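-- pv_equiv track=rewrite | github.com/LCEMocha/Algorithm | 백준/Gold/2831. 댄스 파티/댄스 파티.py | max_couples
-- ===== SOURCE A (Python) =====
-- def max_couples(men, women):
--     men_pos = sorted([m for m in men if m > 0])
--     men_neg = sorted([-m for m in men if m < 0])
--     women_pos = sorted([w for w in women if w > 0])
--     women_neg = sorted([-w for w in women if w < 0])
--
--     def count_pairs(men_list, women_list):
--         count = 0
--         i, j = 0, 0
--         while i < len(men_list) and j < len(women_list):
--             if men_list[i] < women_list[j]:
--                 count += 1
--                 i += 1
--                 j += 1
--             else:
--                 j += 1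
--         return count
--
--     count1 = count_pairs(men_pos, women_neg)
--     count2 = count_pairs(women_pos, men_neg)
--
--     return count1 + count2
-- ===== SOURCE B (Python) =====
-- def max_couples(men, women):
--     # alternative algorithm: instead of a two-pointer scan over two separately
--     # sorted lists, merge each (men, women) group into one sorted event stream
--     # (2*h+1 for a man, 2*h for a woman, so at equal height the woman comes
--     # first) and sweep once with a counter of available unmatched men.
--     def count(ms, ws):
--         events = sorted([2 * m + 1 for m in ms] + [2 * w for w in ws])
--         avail = 0
--         total = 0
--         for e in events:
--             if e % 2:
--                 avail += 1
--             elif avail: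
--                 avail -= 1
--                 total += 1
--         return total
--
--     return count([m for m in men if m > 0], [-w for w in women if w < 0]) + \
--            count([w for w in women if w > 0], [-m for m in men if m < 0])
-- ===== Notes on version B (the rewrite author's own statement) =====
-- stated objective: alternative
-- what changed: Replaces the two-pointer scan over two separately sorted lists by a single sweep over one merged sorted event stream (2*h+1 for men, 2*h for women, so women precede men at equal height) maintaining a counter of available unmatched men.
import Mathlib
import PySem

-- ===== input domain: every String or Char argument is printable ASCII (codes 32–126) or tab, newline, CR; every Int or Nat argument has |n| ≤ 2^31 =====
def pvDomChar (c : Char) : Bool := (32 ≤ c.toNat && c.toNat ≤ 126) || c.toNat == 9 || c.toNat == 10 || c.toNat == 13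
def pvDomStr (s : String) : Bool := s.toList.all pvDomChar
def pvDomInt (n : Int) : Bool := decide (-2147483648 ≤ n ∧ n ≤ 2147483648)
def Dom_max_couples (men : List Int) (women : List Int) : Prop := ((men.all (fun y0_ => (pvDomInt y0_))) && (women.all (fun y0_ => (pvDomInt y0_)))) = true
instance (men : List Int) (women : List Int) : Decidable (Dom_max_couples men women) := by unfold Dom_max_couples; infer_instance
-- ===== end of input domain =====

-- B replaces A's two-pointer scan of the two separately sorted lists by a single sweep over one
-- merged sorted event stream with an available-men counter (alternative algorithm, similar cost).

-- ===== PORT A =====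
-- the inner while loop of count_pairs: state (count, i, j) kept as (count, remaining suffixes)
def countPairsGo (ml wl : List Int) (count : Int) : Int :=
  match ml, wl with
  | m :: ms, w :: ws =>
      if m < w then countPairsGo ms ws (count + 1)
      else countPairsGo (m :: ms) ws count
  | _, _ => count
termination_by wl.length

def max_couples (men : List Int) (women : List Int) : Int :=
  let men_pos := PySem.List.sorted (men.filter (fun m => decide (m > 0))) (fun x => x) false
  let men_neg := PySem.List.sorted ((men.filter (fun m => decide (m < 0))).map (fun m => -m)) (fun x => x) false
  let women_pos := PySem.List.sorted (women.filter (fun w => decide (w > 0))) (fun x => x) false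
  let women_neg := PySem.List.sorted ((women.filter (fun w => decide (w < 0))).map (fun w => -w)) (fun x => x) false
  let count1 := countPairsGo men_pos women_neg 0
  let count2 := countPairsGo women_pos men_neg 0
  count1 + count2

-- ===== PORT B =====
-- the for-loop over the merged event list: state (avail, total)
def sweepGo (events : List Int) (avail total : Int) : Int :=
  match events with
  | [] => total
  | e :: es =>
      if PySem.Int.mod e 2 ≠ 0 then sweepGo es (avail + 1) total
      else if avail ≠ 0 then sweepGo es (avail - 1) (total + 1)
      else sweepGo es avail total

def countSweep (ms ws : List Int) : Int :=
  let events := PySem.List.sorted (ms.map (fun m => 2 * m + 1) ++ ws.map (fun w => 2 * w)) (fun x => x) false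
  sweepGo events 0 0

def max_couples_alt (men : List Int) (women : List Int) : Int :=
  countSweep (men.filter (fun m => decide (m > 0))) ((women.filter (fun w => decide (w < 0))).map (fun w => -w))
  + countSweep (women.filter (fun w => decide (w > 0))) ((men.filter (fun m => decide (m < 0))).map (fun m => -m))

-- ===== PRECONDITION & SPEC =====
def Spec_max_couples (men : List Int) (women : List Int) (out : Int) : Prop := out = max_couples_alt men women
instance (men : List Int) (women : List Int) (out : Int) : Decidable (Spec_max_couples men women out) := by unfold Spec_max_couples; infer_instance

-- ===== CLAIM (what is proved, stated in full; the proofs are below) =====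
def Claim_equal_max_couples : Prop := ∀ (men : List Int) (women : List Int), Dom_max_couples men women → Spec_max_couples men women (max_couples men women)

-- ===== LEMMAS AND PROOFS =====

-- proof-side merge of two ascending lists (with our odd/even tags ties never cross lists)
def mg : List Int → List Int → List Int
  | [], ys => ys
  | x :: xs, [] => x :: xs
  | x :: xs, y :: ys => if x ≤ y then x :: mg xs (y :: ys) else y :: mg (x :: xs) ys
termination_by a b => a.length + b.length

-- proof-side recursive form of the sweep, on the untagged lists (a = available men)
def S : Int → List Int → List Int → Int
  | a, m :: ms, w :: ws =>
      if m < w then S (a + 1) ms (w :: ws)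
      else if a ≠ 0 then 1 + S (a - 1) (m :: ms) ws else S a (m :: ms) ws
  | a, [], w :: ws => if a ≠ 0 then 1 + S (a - 1) [] ws else S a [] ws
  | _, _, [] => 0
termination_by _ a b => a.length + b.length

theorem mod_two_odd (k : Int) : PySem.Int.mod (2 * k + 1) 2 = 1 := by
  rw [PySem.Int.mod_eq_emod_of_pos (by norm_num : (0:Int) < 2)]; omega
theorem mod_two_even (k : Int) : PySem.Int.mod (2 * k) 2 = 0 := by
  rw [PySem.Int.mod_eq_emod_of_pos (by norm_num : (0:Int) < 2)]; omega

theorem sweep_all_men (A : List Int) : ∀ a t : Int, sweepGo (A.map (fun m => 2 * m + 1)) a t = t := by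
  induction A with
  | nil => intro a t; rfl
  | cons m ms ih => intro a t; rw [List.map, sweepGo]; simp; exact ih _ _

theorem mg_cons_cons (x y : Int) (xs ys : List Int) :
    mg (x :: xs) (y :: ys) = if x ≤ y then x :: mg xs (y :: ys) else y :: mg (x :: xs) ys := by
  rw [mg.eq_def]
theorem mg_nil_left (ys : List Int) : mg [] ys = ys := by rw [mg.eq_def]
theorem mg_nil_right (xs : List Int) : mg xs [] = xs := by rw [mg.eq_def]; cases xs <;> rfl

theorem sweepGo_mg : ∀ (a : Int) (A B : List Int) (t : Int),
    sweepGo (mg (A.map (fun m => 2 * m + 1)) (B.map (fun w => 2 * w))) a t = t + S a A B := by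
  intro a A B
  fun_induction S a A B with
  | case1 a m ms w ws h ih =>
      intro t
      simp only [List.map_cons] at ih ⊢
      rw [mg_cons_cons, if_pos (by omega : (2*m+1 : Int) ≤ 2*w), sweepGo]
      simp only [mod_two_odd]
      norm_num
      exact ih t
  | case2 a m ms w ws h ha ih =>
      intro t
      simp only [List.map_cons] at ih ⊢
      rw [mg_cons_cons, if_neg (by omega : ¬ (2*m+1 : Int) ≤ 2*w), sweepGo]
      simp only [mod_two_even]
      norm_num
      rw [if_neg ha, ih (t+1)]; ring
  | case3 a m ms w ws h ha ih =>
      intro t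
      have ha0 : a = 0 := by omega
      subst ha0
      simp only [List.map_cons] at ih ⊢
      rw [mg_cons_cons, if_neg (by omega : ¬ (2*m+1 : Int) ≤ 2*w), sweepGo]
      simp only [mod_two_even]
      norm_num
      exact ih t
  | case4 a w ws ha ih =>
      intro t
      simp only [List.map_cons, List.map_nil, mg_nil_left] at ih ⊢
      rw [sweepGo]
      simp only [mod_two_even]
      norm_num
      rw [if_neg ha, ih (t+1)]; ring
  | case5 a w ws ha ih =>
      intro t
      have ha0 : a = 0 := by omega
      subst ha0
      simp only [List.map_cons, List.map_nil, mg_nil_left] at ih ⊢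
      rw [sweepGo]
      simp only [mod_two_even]
      norm_num
      exact ih t
  | case6 a A =>
      intro t
      match A with
      | [] => simp [mg_nil_left, sweepGo]
      | m :: ms =>
          simp only [List.map_cons, List.map_nil]
          rw [mg_nil_right]
          have := sweep_all_men (m :: ms) a t
          simp only [List.map_cons] at this
          rw [this]; ring

theorem countPairsGo_nil_right (A : List Int) (c : Int) : countPairsGo A [] c = c := by
  cases A <;> rw [countPairsGo.eq_def]
theorem countPairsGo_nil_left (B : List Int) (c : Int) : countPairsGo [] B c = c := by
  cases B <;> rw [countPairsGo.eq_def]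
theorem countPairsGo_cons (m w : Int) (ms ws : List Int) (c : Int) :
    countPairsGo (m :: ms) (w :: ws) c =
      if m < w then countPairsGo ms ws (c + 1) else countPairsGo (m :: ms) ws c := by
  rw [countPairsGo.eq_def]

theorem countPairsGo_acc (wl : List Int) : ∀ (ml : List Int) (c : Int),
    countPairsGo ml wl c = c + countPairsGo ml wl 0 := by
  induction wl with
  | nil => intro ml c; rw [countPairsGo_nil_right, countPairsGo_nil_right]; ring
  | cons w ws ih =>
      intro ml c
      cases ml with
      | nil => rw [countPairsGo_nil_left, countPairsGo_nil_left]; ring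
      | cons m ms =>
          rw [countPairsGo_cons, countPairsGo_cons]
          by_cases h : m < w
          · rw [if_pos h, if_pos h, ih ms (c + 1), ih ms (0 + 1)]; ring
          · rw [if_neg h, if_neg h, ih (m :: ms) c]

theorem S_eq_cp : ∀ (a : Int) (A B : List Int), 0 ≤ a → B.Pairwise (· ≤ ·) →
    S a A B = min a (B.length : Int) + countPairsGo A (B.drop a.toNat) 0 := by
  intro a A B
  fun_induction S a A B with
  | case1 a m ms w ws hmw ih =>
      intro ha hB
      have ih' := ih (by omega) hB
      rw [ih']
      by_cases hbig : ((w :: ws).length : Int) ≤ a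
      · have h1 : (w :: ws).drop a.toNat = [] := List.drop_eq_nil_of_le (by simp at hbig ⊢; omega)
        have h2 : (w :: ws).drop (a + 1).toNat = [] := List.drop_eq_nil_of_le (by simp at hbig ⊢; omega)
        rw [h1, h2, countPairsGo_nil_right, countPairsGo_nil_right]
        simp at hbig ⊢; omega
      · have hlt : a.toNat < (w :: ws).length := by simp at hbig ⊢; omega
        have hd : (w :: ws).drop a.toNat = (w :: ws)[a.toNat] :: (w :: ws).drop (a.toNat + 1) :=
          List.drop_eq_getElem_cons hlt
        have hwb : w ≤ (w :: ws)[a.toNat] := by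
          rcases Nat.eq_zero_or_pos a.toNat with h0 | h0
          · simp [h0]
          · have := List.pairwise_iff_getElem.mp hB 0 a.toNat (by simp) hlt (by omega)
            simpa using this
        rw [hd, countPairsGo_cons, if_pos (by omega : m < (w :: ws)[a.toNat])]
        rw [countPairsGo_acc _ _ (0 + 1)]
        have ht : (a + 1).toNat = a.toNat + 1 := by omega
        rw [ht]
        simp at hbig ⊢
        omega
  | case2 a m ms w ws hmw ha ih =>
      intro ha0 hB
      have ih' := ih (by omega) (List.pairwise_cons.mp hB).2
      rw [ih']
      have hd : (w :: ws).drop a.toNat = ws.drop (a - 1).toNat := by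
        have h1 : a.toNat = (a - 1).toNat + 1 := by omega
        rw [h1]; rfl
      rw [hd]
      simp
      omega
  | case3 a m ms w ws hmw ha ih =>
      intro ha0 hB
      have haz : a = 0 := by omega
      subst haz
      have ih' := ih (by omega) (List.pairwise_cons.mp hB).2
      rw [ih']
      simp
      rw [countPairsGo_cons, if_neg hmw]
      omega
  | case4 a w ws ha ih =>
      intro ha0 hB
      have ih' := ih (by omega) (List.pairwise_cons.mp hB).2
      rw [ih']
      have hd : (w :: ws).drop a.toNat = ws.drop (a - 1).toNat := by
        have h1 : a.toNat = (a - 1).toNat + 1 := by omega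
        rw [h1]; rfl
      rw [hd]
      simp [countPairsGo_nil_left]
      omega
  | case5 a w ws ha ih =>
      intro ha0 hB
      have haz : a = 0 := by omega
      subst haz
      have ih' := ih (by omega) (List.pairwise_cons.mp hB).2
      rw [ih']
      simp [countPairsGo_nil_left]
      omega
  | case6 a A =>
      intro ha hB
      rw [List.drop_nil, countPairsGo_nil_right]
      simp
      omega

theorem mg_perm : ∀ xs ys : List Int, (mg xs ys).Perm (xs ++ ys) := by
  intro xs ys
  fun_induction mg xs ys with
  | case1 ys => simp
  | case2 x xs => simp
  | case3 x xs y ys h ih => exact ih.cons x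
  | case4 x xs y ys h ih => exact (ih.cons y).trans List.perm_middle.symm

theorem mg_pairwise : ∀ xs ys : List Int, xs.Pairwise (· ≤ ·) → ys.Pairwise (· ≤ ·) →
    (mg xs ys).Pairwise (· ≤ ·) := by
  intro xs ys hx hy
  fun_induction mg xs ys with
  | case1 ys => exact hy
  | case2 x xs => exact hx
  | case3 x xs y ys h ih =>
      have hx' := List.pairwise_cons.mp hx
      refine List.pairwise_cons.mpr ⟨?_, ih hx'.2 hy⟩
      intro z hz
      rcases List.mem_append.mp ((mg_perm xs (y :: ys)).mem_iff.mp hz) with h1 | h2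
      · exact hx'.1 z h1
      · rcases List.mem_cons.mp h2 with rfl | h3
        · omega
        · have := (List.pairwise_cons.mp hy).1 z h3; omega
  | case4 x xs y ys h ih =>
      have hy' := List.pairwise_cons.mp hy
      refine List.pairwise_cons.mpr ⟨?_, ih hx hy'.2⟩
      intro z hz
      rcases List.mem_append.mp ((mg_perm (x :: xs) ys).mem_iff.mp hz) with h1 | h2
      · rcases List.mem_cons.mp h1 with rfl | h3
        · omega
        · have := (List.pairwise_cons.mp hx).1 z h3; omega
      · exact hy'.1 z h2

-- map by a monotone function preserves sortedness
theorem pairwise_map_mono (f : Int → Int) (hf : ∀ a b : Int, a ≤ b → f a ≤ f b)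
    (l : List Int) (h : l.Pairwise (· ≤ ·)) : (l.map f).Pairwise (· ≤ ·) :=
  (List.pairwise_map).mpr (h.imp (fun hab => hf _ _ hab))

-- sorting the tagged union = merging the tagged sorted halves
theorem sorted_union_eq_mg (P Q : List Int) :
    PySem.List.sorted (P.map (fun m => 2 * m + 1) ++ Q.map (fun w => 2 * w)) (fun x => x) false
      = mg ((PySem.List.sorted P (fun x => x) false).map (fun m => 2 * m + 1))
           ((PySem.List.sorted Q (fun x => x) false).map (fun w => 2 * w)) := by
  apply PySem.List.sorted_id_eq_of_perm_of_pairwise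
  · refine (mg_perm _ _).trans ?_
    exact List.Perm.append ((PySem.List.sorted_perm _ _ _).map _) ((PySem.List.sorted_perm _ _ _).map _)
  · exact mg_pairwise _ _
      (pairwise_map_mono _ (by intro a b h; omega) _ (by simpa using PySem.List.sorted_pairwise P (fun x => x)))
      (pairwise_map_mono _ (by intro a b h; omega) _ (by simpa using PySem.List.sorted_pairwise Q (fun x => x)))

-- the one-pass sweep equals A's two-pointer count on the sorted lists
theorem countSweep_eq (P Q : List Int) :
    countSweep P Q = countPairsGo (PySem.List.sorted P (fun x => x) false)
                                  (PySem.List.sorted Q (fun x => x) false) 0 := by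
  unfold countSweep
  rw [sorted_union_eq_mg, sweepGo_mg,
    S_eq_cp _ _ _ (by omega) (by simpa using PySem.List.sorted_pairwise Q (fun x => x))]
  simp

-- ===== VERDICT (by name: the statement is the Claim_ definition above) =====
theorem max_couples_spec : Claim_equal_max_couples := by
  intro men women _
  unfold Spec_max_couples max_couples max_couples_alt
  rw [countSweep_eq, countSweep_eq]
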